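-- pv_equiv track=rewrite | github.com/ucom96/codingTest-py | test2.py | solution
-- ===== SOURCE A (Python) =====
-- def solution(prices):
--     answer = []
--     lth = len(prices)
--     #가격이 떨어진다 = prices 배열에서 자신 이후의 원소들 중 더 작은 원소가 있을 경우
--     #매번 배열의 뒤 원소들의 크기를 체크해야함 = O(n^2)
--     for idx, price in enumerate(prices):
--       after = prices[idx+1:]
--       if idx == lth-1:
--         answer.append(lth-(idx+1))
--       else:
--         smallestPrice = min(after)
--         if price > smallestPrice:
--           answer.append(prices.index(smallestPrice,idx+1)-idx)
--         else:
--           answer.append(lth-(idx+1))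
--
--     return answer
-- ===== SOURCE B (Python) =====
-- def solution(prices):
--     # One right-to-left pass keeping the suffix minimum and the first index
--     # where it occurs, instead of rescanning the suffix for every position.
--     n = len(prices)
--     out = []
--     m = None      # min of the suffix strictly to the right of i
--     j = n         # first index (>= i+1) where m occurs
--     for i in range(n - 1, -1, -1):
--         p = prices[i]
--         if m is not None and p > m:
--             out.append(j - i)
--         else:
--             out.append(n - 1 - i)
--         if m is None or p <= m:
--             m = p
--             j = i
--     out.reverse()
--     return out
-- ===== Notes on version B (the rewrite author's own statement) =====
-- stated objective: faster
-- what changed: Replaces A's per-index rescan of the suffix (min() plus list.index on prices[idx+1:]) with a single right-to-left pass that maintains the suffix minimum and the first index where it occurs.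
import Mathlib
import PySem

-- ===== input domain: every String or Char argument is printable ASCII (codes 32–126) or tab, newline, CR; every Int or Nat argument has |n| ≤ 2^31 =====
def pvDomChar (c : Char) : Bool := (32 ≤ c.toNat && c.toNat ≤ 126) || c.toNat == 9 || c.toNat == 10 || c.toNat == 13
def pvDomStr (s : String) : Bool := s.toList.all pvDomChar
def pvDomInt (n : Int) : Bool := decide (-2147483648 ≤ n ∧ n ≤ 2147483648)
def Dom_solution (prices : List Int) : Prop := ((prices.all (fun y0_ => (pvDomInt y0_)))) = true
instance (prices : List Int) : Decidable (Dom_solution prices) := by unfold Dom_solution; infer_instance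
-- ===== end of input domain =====

-- B replaces A's per-index rescan of the suffix (min + index) by a single
-- right-to-left pass maintaining the suffix minimum and its first index.

-- ===== PORT A =====
-- Literal port of A: for each index, slice the suffix, take min, and find the
-- first index of that min with list.index(v, idx+1) (hand-ported as idx+1 plus
-- index? on the slice, exact since the slice is prices[idx+1:]).
-- The 'none' fallbacks are unreachable (the slice is nonempty off the last index
-- and the min is a member); A never raises, so there is no Pre_.
def solution (prices : List Int) : List Int :=
  let lth : Int := prices.length
  (PySem.List.enumerate prices).foldl (fun answer ip =>
    let idx := ip.1
    let price := ip.2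
    let after := PySem.List.slice prices (some (idx + 1)) none
    if idx = lth - 1 then answer ++ [lth - (idx + 1)]
    else
      match PySem.List.min? after (fun x => x) with
      | none => answer
      | some smallestPrice =>
        if price > smallestPrice then
          match PySem.List.index? after smallestPrice with
          | none => answer
          | some k => answer ++ [(idx + 1 + (k : Int)) - idx]
        else answer ++ [lth - (idx + 1)]) []

-- ===== PORT B =====
-- Port of B: one right-to-left index loop carrying (out, suffix min m, first
-- index j of m); answers are appended and reversed at the end, as in Source B.
def solution_alt (prices : List Int) : List Int :=
  let n : Int := prices.length
  let st := (PySem.List.pyRange (n - 1) (-1) (-1)).foldl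
    (fun (st : List Int × Option Int × Int) i =>
      let p := PySem.List.pyGetD prices i 0
      let out :=
        match st.2.1 with
        | some m => if p > m then st.1 ++ [st.2.2 - i] else st.1 ++ [n - 1 - i]
        | none => st.1 ++ [n - 1 - i]
      match st.2.1 with
      | some m => if p ≤ m then (out, some p, i) else (out, st.2.1, st.2.2)
      | none => (out, some p, i)) ([], none, n)
  st.1.reverse

-- ===== PRECONDITION & SPEC =====
def Spec_solution (prices : List Int) (out : List Int) : Prop := out = solution_alt prices
instance (prices : List Int) (out : List Int) : Decidable (Spec_solution prices out) := by unfold Spec_solution; infer_instance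

-- ===== CLAIM (what is proved, stated in full; the proofs are below) =====
def Claim_equal_solution : Prop := ∀ (prices : List Int), Dom_solution prices → Spec_solution prices (solution prices)

-- ===== LEMMAS AND PROOFS =====

-- Shared per-suffix reference value: head answer of a suffix p :: rest.
def refAns : List Int → List Int
  | [] => []
  | p :: rest =>
    (match PySem.List.min? rest (fun x => x) with
     | none => (0 : Int)
     | some m =>
       if p > m then ((PySem.List.index? rest m).getD 0 : Int) + 1
       else (rest.length : Int)) :: refAns rest

-- The (suffix-min, first-index) state B's loop maintains after consuming suf.
def mstate (suf : List Int) (n i0 : Int) : Option Int × Int :=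
  match PySem.List.min? suf (fun x => x) with
  | none => (none, n)
  | some m => (some m, i0 + ((PySem.List.index? suf m).getD 0 : Int))

lemma foldl_min_comm (t : List Int) : ∀ (a b : Int),
    t.foldl min (min a b) = min a (t.foldl min b) := by
  induction t with
  | nil => intro a b; rfl
  | cons c t ih =>
    intro a b
    simp only [List.foldl_cons, min_assoc, ih]

lemma min?_cons (p : Int) (rest : List Int) :
    PySem.List.min? (p :: rest) (fun x => x)
      = some ((PySem.List.min? rest (fun x => x)).elim p (min p)) := by
  cases rest with
  | nil => simp [PySem.List.min?]
  | cons r t => simp [PySem.List.min?_id_cons, List.foldl_cons, foldl_min_comm]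

lemma goA (prices : List Int) : ∀ (suf pre acc : List Int), prices = pre ++ suf →
    (PySem.List.enumerate suf (pre.length : Int)).foldl
      (fun answer ip =>
        let idx := ip.1
        let price := ip.2
        let after := PySem.List.slice prices (some (idx + 1)) none
        if idx = (prices.length : Int) - 1 then
          answer ++ [(prices.length : Int) - (idx + 1)]
        else
          match PySem.List.min? after (fun x => x) with
          | none => answer
          | some smallestPrice =>
            if price > smallestPrice then
              match PySem.List.index? after smallestPrice with
              | none => answer
              | some k => answer ++ [(idx + 1 + (k : Int)) - idx]
            else answer ++ [(prices.length : Int) - (idx + 1)]) acc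
    = acc ++ refAns suf := by
  intro suf
  induction suf with
  | nil => intro pre acc h; simp [PySem.List.enumerate, refAns]
  | cons p rest ih =>
    intro pre acc h
    have hlen : prices.length = pre.length + 1 + rest.length := by
      subst h; simp; omega
    have hafter : PySem.List.slice prices (some ((pre.length : Int) + 1)) none = rest := by
      rw [show (pre.length : Int) + 1 = ((pre.length + 1 : Nat) : Int) by push_cast; ring,
        PySem.List.slice_from_natCast, h,
        show pre ++ p :: rest = (pre ++ [p]) ++ rest by simp,
        show pre.length + 1 = (pre ++ [p]).length by simp]
      exact List.drop_left
    have hstart : (pre.length : Int) + 1 = (((pre ++ [p]).length : Nat) : Int) := by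
      simp
    have hnext := ih (pre ++ [p]) (acc ++ [(refAns (p :: rest)).headI]) (by simp [h])
    rw [PySem.List.enumerate_cons, List.foldl_cons]
    rw [show ((pre.length : Int) + 1) = (((pre ++ [p]).length : Nat) : Int) from hstart]
    have hstep : (fun (answer : List Int) (ip : Int × Int) =>
        let idx := ip.1
        let price := ip.2
        let after := PySem.List.slice prices (some (idx + 1)) none
        if idx = (prices.length : Int) - 1 then
          answer ++ [(prices.length : Int) - (idx + 1)]
        else
          match PySem.List.min? after (fun x => x) with
          | none => answer
          | some smallestPrice =>
            if price > smallestPrice then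
              match PySem.List.index? after smallestPrice with
              | none => answer
              | some k => answer ++ [(idx + 1 + (k : Int)) - idx]
            else answer ++ [(prices.length : Int) - (idx + 1)]) acc ((pre.length : Int), p)
        = acc ++ [(refAns (p :: rest)).headI] := by
      simp only [hafter]
      by_cases hrest : rest = []
      · have hl0 : prices.length = pre.length + 1 := by rw [hlen, hrest]; simp
        rw [if_pos (by rw [hl0]; push_cast; ring)]
        subst hrest
        simp [refAns, PySem.List.min?]
        rw [hl0]; push_cast; ring
      · have hlpos : 0 < rest.length := List.length_pos_of_ne_nil hrest
        rw [if_neg (by intro hcontra; omega)]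
        obtain ⟨m, hm⟩ : ∃ m, PySem.List.min? rest (fun x => x) = some m := by
          cases hmin : PySem.List.min? rest (fun x => x) with
          | none => exact absurd ((PySem.List.min?_eq_none_iff rest (fun x => x)).mp hmin) hrest
          | some m => exact ⟨m, rfl⟩
        have hmem : m ∈ rest := PySem.List.min?_mem hm
        simp only [hm]
        by_cases hp : p > m
        · obtain ⟨k, hk⟩ : ∃ k, PySem.List.index? rest m = some k := by
            cases hidx : PySem.List.index? rest m with
            | none => exact absurd ((PySem.List.index?_eq_none_iff rest m).mp hidx) (by simp [hmem])
            | some k => exact ⟨k, rfl⟩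
          rw [if_pos hp]
          simp only [hk]
          have hk' : List.idxOf? m rest = some k := by
            simpa [PySem.List.index?_eq_idxOf?] using hk
          simp [refAns, hm, hp, hk']
          ring
        · rw [if_neg hp]
          simp [refAns, hm, hp]
          omega
    have hhead : refAns (p :: rest) = (refAns (p :: rest)).headI :: refAns rest := by
      simp [refAns]
    refine Eq.trans ?_ (hnext.trans ?_)
    · rw [← hstep]
    · rw [List.append_assoc]
      conv_rhs => rw [hhead]
      rfl

lemma goB (prices : List Int) : ∀ (suf pre : List Int), prices = pre ++ suf →
    (PySem.List.pyRange ((prices.length : Int) - 1) ((pre.length : Int) - 1) (-1)).foldl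
      (fun (st : List Int × Option Int × Int) i =>
        let p := PySem.List.pyGetD prices i 0
        let out :=
          match st.2.1 with
          | some m =>
            if p > m then st.1 ++ [st.2.2 - i]
            else st.1 ++ [(prices.length : Int) - 1 - i]
          | none => st.1 ++ [(prices.length : Int) - 1 - i]
        match st.2.1 with
        | some m => if p ≤ m then (out, some p, i) else (out, st.2.1, st.2.2)
        | none => (out, some p, i)) ([], none, (prices.length : Int))
    = ((refAns suf).reverse, mstate suf (prices.length : Int) (pre.length : Int)) := by
  intro suf
  induction suf with
  | nil =>
    intro pre h
    have hl : pre.length = prices.length := by rw [h]; simp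
    rw [hl, PySem.List.pyRange_neg_one_eq_nil (by omega)]
    simp [mstate, PySem.List.min?, refAns]
  | cons p rest ih =>
    intro pre h
    have hlen : prices.length = pre.length + 1 + rest.length := by subst h; simp; omega
    have hrange : PySem.List.pyRange ((prices.length : Int) - 1) ((pre.length : Int) - 1) (-1)
        = PySem.List.pyRange ((prices.length : Int) - 1) (pre.length : Int) (-1)
          ++ [(pre.length : Int)] := by
      rw [PySem.List.pyRange_neg_one_eq_reverse, PySem.List.pyRange_neg_one_eq_reverse,
        show (pre.length : Int) - 1 + 1 = (pre.length : Int) by ring,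
        PySem.List.pyRange_one_cons (show (pre.length : Int) < (prices.length : Int) - 1 + 1 by omega)]
      simp
    have hpre' := ih (pre ++ [p]) (by simp [h])
    rw [show (((pre ++ [p]).length : Nat) : Int) - 1 = (pre.length : Int) by
      simp] at hpre'
    rw [show (((pre ++ [p]).length : Nat) : Int) = (pre.length : Int) + 1 by
      simp] at hpre'
    rw [hrange, List.foldl_append, hpre']
    have hget : PySem.List.pyGetD prices ((pre.length : Nat) : Int) 0 = p := by
      rw [PySem.List.pyGetD_natCast, h]
      simp [List.getD]
    cases hmin : PySem.List.min? rest (fun x => x) with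
    | none =>
      have hrest : rest = [] := (PySem.List.min?_eq_none_iff rest (fun x => x)).mp hmin
      subst hrest
      simp only [List.foldl_cons, List.foldl_nil, hget, mstate, hmin, min?_cons, refAns,
        PySem.List.index?_cons_self, Option.elim]
      simp only [List.length_nil, Nat.add_zero] at hlen
      simp
      omega
    | some m =>
      have hmem : m ∈ rest := PySem.List.min?_mem hmin
      obtain ⟨k, hk⟩ : ∃ k, PySem.List.index? rest m = some k := by
        cases hidx : PySem.List.index? rest m with
        | none => exact absurd ((PySem.List.index?_eq_none_iff rest m).mp hidx) (by simp [hmem])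
        | some k => exact ⟨k, rfl⟩
      have hk' : List.idxOf? m rest = some k := by
        simpa [PySem.List.index?_eq_idxOf?] using hk
      have hrefc : refAns (p :: rest)
          = (if p > m then ((k : Int)) + 1 else ((rest.length : Nat) : Int)) :: refAns rest := by
        simp [refAns, hmin, hk']
      have hms : mstate rest (prices.length : Int) ((pre.length : Int) + 1)
          = (some m, (pre.length : Int) + 1 + (k : Int)) := by
        simp [mstate, hmin, hk']
      have hn1 : (prices.length : Int) - 1 - (pre.length : Int) = ((rest.length : Nat) : Int) := by
        omega
      by_cases hple : p ≤ m
      · have hmstc : mstate (p :: rest) (prices.length : Int) (pre.length : Int)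
            = (some p, (pre.length : Int)) := by
          simp only [mstate, min?_cons, hmin, Option.elim, min_eq_left hple,
            PySem.List.index?_cons_self, Option.getD, Nat.cast_zero, add_zero]
        simp only [List.foldl_cons, List.foldl_nil, hget, hms]
        rw [if_neg (by omega : ¬ p > m), if_pos hple, hrefc, hmstc,
          if_neg (by omega : ¬ p > m), List.reverse_cons, hn1]
      · have hmstc : mstate (p :: rest) (prices.length : Int) (pre.length : Int)
            = (some m, (pre.length : Int) + 1 + (k : Int)) := by
          simp only [mstate, min?_cons, hmin, Option.elim, min_eq_right (by omega : m ≤ p),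
            PySem.List.index?_cons_of_ne rest (show p ≠ m by omega), hk, Option.map,
            Option.getD, Prod.mk.injEq]
          refine ⟨trivial, by push_cast; ring⟩
        simp only [List.foldl_cons, List.foldl_nil, hget, hms]
        rw [if_pos (by omega : p > m), if_neg hple, hrefc, hmstc,
          if_pos (by omega : p > m), List.reverse_cons,
          show (pre.length : Int) + 1 + (k : Int) - (pre.length : Int) = (k : Int) + 1 by ring]

-- ===== VERDICT (by name: the statement is the Claim_ definition above) =====
theorem solution_spec : Claim_equal_solution := by
  intro prices _
  unfold Spec_solution solution solution_alt
  rw [show (PySem.List.enumerate prices : List (Int × Int)) = PySem.List.enumerate prices (([] : List Int).length : Int) by norm_num]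
  rw [goA prices prices [] [] rfl]
  have hB := goB prices prices [] rfl
  simp only [List.length_nil, Nat.cast_zero, zero_sub] at hB
  simp only [hB, List.reverse_reverse, List.nil_append]
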